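-- pv_equiv track=rewrite | github.com/filippocorradino/advent_of_code_2022 | day08.py | scan_tree_line
-- ===== SOURCE A (Python) =====
-- def scan_tree_line(tree_line):
--     max_tree = -1
--     visible_ixs = []
--     for ix, tree in enumerate(tree_line):
--         if tree > max_tree:
--             max_tree = tree
--             visible_ixs.append(ix)
--     return visible_ixs
-- ===== SOURCE B (Python) =====
-- def scan_tree_line(tree_line):
--     trees = list(tree_line)
--     prefix = [-1]
--     for t in trees:
--         prefix.append(max(prefix[-1], t))
--     return [ix for ix, (tree, pmax) in enumerate(zip(trees, prefix)) if tree > pmax]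
-- ===== Notes on version B (the rewrite author's own statement) =====
-- stated objective: alternative
-- what changed: Replaces the single inline max-tracking loop with a prefix-maximum scan table built first, followed by a separate enumerate+zip filtering pass comparing each tree with the maximum before it.
import Mathlib
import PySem

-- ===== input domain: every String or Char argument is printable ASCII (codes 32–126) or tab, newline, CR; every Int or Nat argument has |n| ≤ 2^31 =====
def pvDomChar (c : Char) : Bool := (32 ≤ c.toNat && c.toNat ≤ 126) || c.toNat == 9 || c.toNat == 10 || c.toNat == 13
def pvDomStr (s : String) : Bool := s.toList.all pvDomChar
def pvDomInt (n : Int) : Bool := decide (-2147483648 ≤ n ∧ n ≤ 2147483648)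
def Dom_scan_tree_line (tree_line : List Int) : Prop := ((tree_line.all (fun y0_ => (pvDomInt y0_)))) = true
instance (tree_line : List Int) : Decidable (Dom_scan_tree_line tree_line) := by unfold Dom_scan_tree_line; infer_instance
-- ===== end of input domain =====

-- B builds a prefix-maximum table first and filters against it in a second pass; same O(n) cost, different decomposition.

-- ===== PORT A =====
def scan_tree_line (tree_line : List Int) : List Int :=
  ((PySem.List.enumerate tree_line).foldl
    (fun (st : Int × List Int) p => if p.2 > st.1 then (p.2, st.2 ++ [p.1]) else st)
    ((-1 : Int), ([] : List Int))).2

-- ===== PORT B =====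
def scan_tree_line_alt (tree_line : List Int) : List Int :=
  -- prefix = running maxima with initial -1 (the loop appending max(prefix[-1], t) is List.scanl)
  let pfx := List.scanl (fun a t => max a t) (-1) tree_line
  ((PySem.List.enumerate (tree_line.zip pfx)).filter (fun p => p.2.1 > p.2.2)).map (·.1)

-- ===== PRECONDITION & SPEC =====
def Spec_scan_tree_line (tree_line : List Int) (out : List Int) : Prop := out = scan_tree_line_alt tree_line
instance (tree_line : List Int) (out : List Int) : Decidable (Spec_scan_tree_line tree_line out) := by unfold Spec_scan_tree_line; infer_instance

-- ===== CLAIM (what is proved, stated in full; the proofs are below) =====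
def Claim_equal_scan_tree_line : Prop := ∀ (tree_line : List Int), Dom_scan_tree_line tree_line → Spec_scan_tree_line tree_line (scan_tree_line tree_line)

-- ===== LEMMAS AND PROOFS =====

-- loop invariant: A's fold from state (m, v) equals v ++ B's filter pass against the scan started at m
theorem scan_loop_eq (trees : List Int) : ∀ (s m : Int) (v : List Int),
    ((PySem.List.enumerate trees s).foldl
      (fun (st : Int × List Int) p => if p.2 > st.1 then (p.2, st.2 ++ [p.1]) else st) (m, v)).2
    = v ++ ((PySem.List.enumerate (trees.zip (List.scanl (fun a t => max a t) m trees)) s).filter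
        (fun p => p.2.1 > p.2.2)).map (·.1) := by
  induction trees with
  | nil => intro s m v; simp [PySem.List.enumerate_nil]
  | cons t ts ih =>
    intro s m v
    simp only [List.scanl_cons, List.zip_cons_cons, PySem.List.enumerate_cons, List.foldl_cons,
      List.filter_cons, List.map]
    by_cases h : t > m
    · have hmax : max m t = t := by omega
      simp only [h, if_pos, hmax, decide_eq_true_eq]
      rw [ih (s + 1) t (v ++ [s])]
      simp [h]
    · have hmax : max m t = m := by omega
      simp only [hmax, decide_eq_true_eq]
      rw [if_neg h, ih (s + 1) m v]
      simp [h]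

-- ===== VERDICT (by name: the statement is the Claim_ definition above) =====
theorem scan_tree_line_spec : Claim_equal_scan_tree_line := by
  intro tree_line _
  unfold Spec_scan_tree_line scan_tree_line scan_tree_line_alt
  simpa using scan_loop_eq tree_line 0 (-1) []
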